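-- pv_equiv track=rewrite | github.com/tijnara/wrspos | gui_dialogs.py | validate_price
-- ===== SOURCE A (Python) =====
-- def validate_price(P):
--     """Allow only digits and at most one decimal point."""
--     if P == "": return True
--     try:
--         if P.count('.') <= 1 and all(c.isdigit() or c == '.' for c in P):
--             if P.startswith('0') and len(P) > 1 and not P.startswith('0.'):  # Prevent "07"
--                 return False
--             return True
--         else:
--             return False
--     except ValueError:
--         return False
-- ===== SOURCE B (Python) =====
-- def validate_price(P):
--     """Allow only digits and at most one decimal point."""
--     # Deterministic finite automaton, one left-to-right pass.
--     # States: 0 start (empty ok), 1 seen lone leading '0', 2 in integer part,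
--     #         3 in/after decimal point, 4 reject (sink).
--     state = 0
--     for c in P:
--         if state == 0:
--             if c == '0':
--                 state = 1
--             elif c == '.':
--                 state = 3
--             elif c.isdigit():
--                 state = 2
--             else:
--                 state = 4
--         elif state == 1:
--             state = 3 if c == '.' else 4
--         elif state == 2:
--             if c.isdigit():
--                 state = 2
--             elif c == '.':
--                 state = 3
--             else:
--                 state = 4
--         elif state == 3:
--             state = 3 if c.isdigit() else 4
--     return state != 4
-- ===== Notes on version B (the rewrite author's own statement) =====
-- stated objective: alternative
-- what changed: B replaces A's dot-count plus whole-string character scan plus leading-zero prefix guard by a deterministic finite automaton: one left-to-right pass over the characters through explicit states (start / lone leading zero / integer part / after the dot / reject), accepting iff the reject sink is never reached.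
import Mathlib
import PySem

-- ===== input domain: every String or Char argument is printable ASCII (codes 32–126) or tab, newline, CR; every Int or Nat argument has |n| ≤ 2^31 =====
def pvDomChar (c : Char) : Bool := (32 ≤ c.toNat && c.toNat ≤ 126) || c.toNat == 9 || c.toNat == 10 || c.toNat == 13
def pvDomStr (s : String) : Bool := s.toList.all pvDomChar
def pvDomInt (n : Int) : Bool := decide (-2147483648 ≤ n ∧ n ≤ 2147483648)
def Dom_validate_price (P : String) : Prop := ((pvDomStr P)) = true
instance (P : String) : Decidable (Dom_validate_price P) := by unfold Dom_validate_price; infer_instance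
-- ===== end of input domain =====

-- B validates with a deterministic finite automaton (one pass, explicit states) instead of
-- A's dot-count + whole-string scan + leading-zero prefix guard; objective: alternative, same cost.


-- ===== PORT A =====
-- literal port: the dead 'except ValueError' branch of A is unreachable and not ported
def validate_price (P : String) : Bool :=
  if P == "" then true
  else
    if decide (PySem.Str.count P "." ≤ 1) && P.toList.all (fun c => PySem.Chars.isdigit c || c == '.') then
      if PySem.Str.startswith P "0" && decide (PySem.Str.len P > 1) && !PySem.Str.startswith P "0." then
        false
      else true
    else false

-- ===== PORT B =====
-- DFA transition: 0 start, 1 lone leading '0', 2 integer part, 3 after the dot, 4 reject sink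
def vpTrans (s : Nat) (c : Char) : Nat :=
  if s = 0 then
    if c == '0' then 1
    else if c == '.' then 3
    else if PySem.Chars.isdigit c then 2
    else 4
  else if s = 1 then (if c == '.' then 3 else 4)
  else if s = 2 then
    if PySem.Chars.isdigit c then 2
    else if c == '.' then 3
    else 4
  else if s = 3 then (if PySem.Chars.isdigit c then 3 else 4)
  else 4

def validate_price_alt (P : String) : Bool :=
  (P.toList.foldl vpTrans 0) != 4

-- ===== PRECONDITION & SPEC =====
def Spec_validate_price (P : String) (out : Bool) : Prop := out = validate_price_alt P
instance (P : String) (out : Bool) : Decidable (Spec_validate_price P out) := by unfold Spec_validate_price; infer_instance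

-- ===== CLAIM (what is proved, stated in full; the proofs are below) =====
def Claim_equal_validate_price : Prop := ∀ (P : String), Dom_validate_price P → Spec_validate_price P (validate_price P)

-- ===== LEMMAS AND PROOFS =====

theorem foldl_sink (l : List Char) : l.foldl vpTrans 4 = 4 := by
  induction l with
  | nil => rfl
  | cons c t ih => simpa [vpTrans] using ih

theorem isdigit_dot : PySem.Chars.isdigit '.' = false := by decide

theorem isdigit_zero : PySem.Chars.isdigit '0' = true := by decide

theorem foldl_state3 (l : List Char) :
    l.foldl vpTrans 3 = if l.all PySem.Chars.isdigit then 3 else 4 := by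
  induction l with
  | nil => rfl
  | cons c t ih =>
    by_cases hd : PySem.Chars.isdigit c = true
    · simp [vpTrans, hd, ih]
    · simp [List.foldl, vpTrans, hd, foldl_sink, List.all_cons]

-- all-digits = (digit-or-dot everywhere and no dot at all)
theorem all_digit_eq (l : List Char) :
    l.all PySem.Chars.isdigit
      = (l.all (fun c => PySem.Chars.isdigit c || c == '.') && decide (l.count '.' = 0)) := by
  induction l with
  | nil => simp
  | cons c t ih =>
    by_cases hc : c = '.'
    · subst hc; simp [isdigit_dot]
    · have : (c == '.') = false := by simpa using hc
      rw [List.all_cons, List.all_cons, ih, List.count_cons]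
      cases hd : PySem.Chars.isdigit c <;> simp [this]

theorem foldl_state2 (l : List Char) :
    (l.foldl vpTrans 2 != 4)
      = (l.all (fun c => PySem.Chars.isdigit c || c == '.') && decide (l.count '.' ≤ 1)) := by
  induction l with
  | nil => simp
  | cons c t ih =>
    by_cases hc : c = '.'
    · subst hc
      rw [List.foldl_cons, show vpTrans 2 '.' = 3 from rfl, foldl_state3,
        all_digit_eq, List.all_cons, List.count_cons]
      by_cases ha : t.all (fun c => PySem.Chars.isdigit c || c == '.') = true
      · by_cases h0 : t.count '.' = 0
        · simp [ha, h0]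
        · have : ¬ (t.count '.' + 1 ≤ 1) := by omega
          simp [ha, h0, this]
      · simp [Bool.eq_false_iff.mpr ha]
    · have hcb : (c == '.') = false := by simpa using hc
      by_cases hd : PySem.Chars.isdigit c = true
      · rw [List.foldl_cons, show vpTrans 2 c = 2 by simp [vpTrans, hd], ih,
          List.all_cons, List.count_cons]
        simp [hd, hcb]
      · rw [List.foldl_cons, show vpTrans 2 c = 4 by
          simp [vpTrans, Bool.eq_false_iff.mpr hd, hcb], foldl_sink, List.all_cons]
        simp [Bool.eq_false_iff.mpr hd, hcb]

theorem count_go_dot (l : List Char) : ∀ (fuel acc : Nat), l.length ≤ fuel →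
    PySem.Chars.count.go ['.'] fuel l acc = acc + l.count '.' := by
  induction l with
  | nil => intro fuel acc _; cases fuel <;> simp [PySem.Chars.count.go]
  | cons c t ih =>
    intro fuel acc h
    cases fuel with
    | zero => simp at h
    | succ f =>
      by_cases hc : c = '.'
      · subst hc
        simp only [PySem.Chars.count.go, List.isPrefixOf, BEq.rfl, Bool.true_and, if_true]
        rw [show List.drop (['.'] : List Char).length ('.' :: t) = t from rfl]
        rw [ih f (acc + 1) (by simpa using h)]
        rw [List.count_cons]
        simp only [BEq.rfl, if_true]
        omega
      · simp only [PySem.Chars.count.go, List.isPrefixOf]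
        rw [if_neg (by simp [Ne.symm hc])]
        rw [ih f acc (by simpa using h)]
        rw [List.count_cons]
        simp [hc]

theorem count_dot (cs : List Char) : PySem.Chars.count cs ['.'] = cs.count '.' := by
  simp only [PySem.Chars.count, List.isEmpty_cons, if_false, Bool.false_eq_true]
  simpa using count_go_dot cs cs.length 0 le_rfl

theorem toList_eq_nil_iff (P : String) : P.toList = [] ↔ P = "" := by
  constructor
  · intro h
    simpa using congrArg String.ofList h
  · intro h; simp [h]

theorem cast_len_cons2 (a b : Char) (r : List Char) :
    ((1 : Int) < ((a :: b :: r).length : Int)) := by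
  simp only [List.length_cons]
  push_cast
  omega

-- ===== VERDICT (by name: the statement is the Claim_ definition above) =====
theorem validate_price_spec : Claim_equal_validate_price := by
  intro P _
  unfold Spec_validate_price validate_price validate_price_alt
  rw [PySem.Str.count_eq, show (".": String).toList = ['.'] from rfl, count_dot,
    PySem.Str.startswith_eq, PySem.Str.startswith_eq, PySem.Str.len_eq,
    show ("0": String).toList = ['0'] from rfl,
    show ("0.": String).toList = ['0', '.'] from rfl]
  cases hL : P.toList with
  | nil =>
    have : P = "" := (toList_eq_nil_iff P).mp hL
    simp [this]
  | cons c t =>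
    have hne : (P == "") = false := by
      apply Bool.eq_false_iff.mpr
      intro h
      have : P = "" := by simpa using h
      rw [this] at hL; simp at hL
    rw [hne]
    simp only [Bool.false_eq_true, if_false, List.foldl_cons]
    by_cases hc0 : c = '0'
    · subst hc0
      rw [show vpTrans 0 '0' = 1 from rfl]
      cases t with
      | nil => simp [PySem.Chars.startswith, List.isPrefixOf, isdigit_zero]
      | cons d r =>
        by_cases hd : d = '.'
        · subst hd
          rw [show List.foldl vpTrans 1 ('.' :: r) = List.foldl vpTrans 3 r from rfl,
            foldl_state3, all_digit_eq]
          have hsw : PySem.Chars.startswith ('0' :: '.' :: r) ['0', '.'] = true := by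
            simp [PySem.Chars.startswith, List.isPrefixOf]
          rw [hsw]
          rw [List.count_cons, List.count_cons]
          by_cases ha : r.all (fun c => PySem.Chars.isdigit c || c == '.') = true
          · by_cases h0 : r.count '.' = 0
            · simp [ha, h0, isdigit_dot, isdigit_zero]
            · have : ¬ (r.count '.' + 1 ≤ 1) := by omega
              simp [ha, h0, this, isdigit_dot]
          · simp [Bool.eq_false_iff.mpr ha, isdigit_dot, isdigit_zero]
        · have hdb : (d == '.') = false := by simpa using hd
          rw [show List.foldl vpTrans 1 (d :: r) = List.foldl vpTrans 4 r by
            simp [List.foldl, vpTrans, hdb], foldl_sink]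
          have hsw0 : PySem.Chars.startswith ('0' :: d :: r) ['0'] = true := by
            simp [PySem.Chars.startswith, List.isPrefixOf]
          have hsw2 : PySem.Chars.startswith ('0' :: d :: r) ['0', '.'] = false := by
            simp [PySem.Chars.startswith, List.isPrefixOf, Ne.symm hd]
          have hguard : (PySem.Chars.startswith ('0' :: d :: r) ['0'] &&
              decide (((('0' :: d :: r).length : Int)) > 1) &&
              !PySem.Chars.startswith ('0' :: d :: r) ['0', '.']) = true := by
            rw [hsw0, hsw2]
            simpa using cast_len_cons2 '0' d r
          rw [hguard]
          by_cases hcond : (decide (List.count '.' ('0' :: d :: r) ≤ 1)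
              && ('0' :: d :: r).all (fun c => PySem.Chars.isdigit c || c == '.')) = true
          · rw [if_pos hcond, if_pos rfl]
            simp
          · rw [if_neg (by simpa using Bool.eq_false_iff.mpr hcond)]
            simp
    · have hc0b : (c == '0') = false := by simpa using hc0
      have hsw0 : PySem.Chars.startswith (c :: t) ['0'] = false := by
        simp [PySem.Chars.startswith, List.isPrefixOf, Ne.symm hc0]
      rw [hsw0]
      by_cases hcdot : c = '.'
      · subst hcdot
        rw [show vpTrans 0 '.' = 3 from rfl, foldl_state3, all_digit_eq]
        rw [List.count_cons, List.all_cons]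
        by_cases ha : t.all (fun c => PySem.Chars.isdigit c || c == '.') = true
        · by_cases h0 : t.count '.' = 0
          · simp [ha, h0, isdigit_dot]
          · have : ¬ (t.count '.' + 1 ≤ 1) := by omega
            simp [ha, h0, this, isdigit_dot]
        · simp [Bool.eq_false_iff.mpr ha, isdigit_dot]
      · have hcdb : (c == '.') = false := by simpa using hcdot
        by_cases hd : PySem.Chars.isdigit c = true
        · rw [show vpTrans 0 c = 2 by simp [vpTrans, hc0b, hcdb, hd], foldl_state2]
          rw [List.count_cons, List.all_cons]
          simp only [hd, hcdb, Bool.true_or, Bool.true_and, Bool.false_eq_true,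
            Bool.false_and, if_false, Nat.add_zero]
          cases hall : (t.all fun c => PySem.Chars.isdigit c || c == '.') <;>
            cases hcnt : decide (List.count '.' t ≤ 1) <;> simp_all
        · rw [show vpTrans 0 c = 4 by
            simp [vpTrans, hc0b, hcdb, Bool.eq_false_iff.mpr hd], foldl_sink]
          simp [List.all_cons, Bool.eq_false_iff.mpr hd, hcdb]
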